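-- pv_equiv track=rewrite | github.com/Francesco-Bovi/L2-Thesis-VIS | graphbuilder_v3_3_transition.py | ChooseNextState
-- ===== SOURCE A (Python) =====
-- def ChooseNextState(graph_s,random_number,transactions,priority_tran):
--
--     #I give priority to transactions with 0 score
--     for t in transactions:
--         possible_state=t[1]
--
--         if(graph_s[possible_state]==0):
--             return t
--
--     #If there are no transitions among the one chosen by user
--     #Go to the node not visited yet
--     for t in transactions:
--         possible_transition=t[0]
--
--         #Give priority to transitions set by users
--         if(possible_transition in priority_tran):
--             return t
--
--     #Otherwise I go random
--     return transactions[random_number]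
-- ===== SOURCE B (Python) =====
-- def ChooseNextState(graph_s, random_number, transactions, priority_tran):
--     # single pass: zero-score wins immediately; remember first priority transition
--     first_priority = None
--     for t in transactions:
--         if graph_s[t[1]] == 0:
--             return t
--         if first_priority is None and t[0] in priority_tran:
--             first_priority = t
--     if first_priority is not None:
--         return first_priority
--     return transactions[random_number]
-- ===== Notes on version B (the rewrite author's own statement) =====
-- stated objective: simpler
-- what changed: A's two sequential scans over transactions (first for zero-score states, then for priority transitions) are merged into one pass that returns on the first zero-score transaction and remembers the first priority transaction for use after the loop.
import Mathlib
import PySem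

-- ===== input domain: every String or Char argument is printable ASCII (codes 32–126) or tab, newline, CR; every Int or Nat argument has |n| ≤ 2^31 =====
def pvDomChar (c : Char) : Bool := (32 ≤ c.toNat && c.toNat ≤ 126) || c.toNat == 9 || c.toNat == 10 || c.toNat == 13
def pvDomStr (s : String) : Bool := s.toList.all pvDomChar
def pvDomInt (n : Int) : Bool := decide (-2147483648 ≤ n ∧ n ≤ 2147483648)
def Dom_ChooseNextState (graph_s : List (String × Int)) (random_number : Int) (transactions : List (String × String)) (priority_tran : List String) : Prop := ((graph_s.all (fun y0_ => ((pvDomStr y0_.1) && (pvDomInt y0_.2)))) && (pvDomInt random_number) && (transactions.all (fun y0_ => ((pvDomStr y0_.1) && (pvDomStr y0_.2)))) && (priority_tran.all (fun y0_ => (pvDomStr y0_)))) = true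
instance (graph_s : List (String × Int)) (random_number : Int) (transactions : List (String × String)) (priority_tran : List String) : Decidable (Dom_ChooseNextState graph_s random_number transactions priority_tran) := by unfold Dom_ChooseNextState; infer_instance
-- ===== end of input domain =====

-- B merges A's two sequential scans over `transactions` into one pass that
-- remembers the first priority transition (objective: simpler). Return value only; no mutation.

-- ===== PORT A =====
-- first loop: first t whose state has score 0 (dict lookup; key absent = KeyError, excluded by Pre_)
def aZeroLoop (graph_s : List (String × Int)) : List (String × String) → Option (String × String)
  | [] => none
  | t :: r => if PySem.Dict.get? (PySem.Dict.mk graph_s) t.2 == some 0 then some t else aZeroLoop graph_s r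

-- second loop: first t whose transition name is in priority_tran
def aPrioLoop (priority_tran : List String) : List (String × String) → Option (String × String)
  | [] => none
  | t :: r => if priority_tran.contains t.1 then some t else aPrioLoop priority_tran r

def ChooseNextState (graph_s : List (String × Int)) (random_number : Int) (transactions : List (String × String)) (priority_tran : List String) : String × String :=
  match aZeroLoop graph_s transactions with
  | some t => t
  | none =>
    match aPrioLoop priority_tran transactions with
    | some t => t
    | none => (PySem.List.pyGet? transactions random_number).getD ("", "")  -- none = IndexError, excluded by Pre_

-- ===== PORT B =====
-- single pass with remembered first_priority; returns on the first zero-score transaction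
def altLoop (graph_s : List (String × Int)) (random_number : Int) (all : List (String × String)) (priority_tran : List String) : List (String × String) → Option (String × String) → String × String
  | [], first_priority =>
    match first_priority with
    | some t => t
    | none => (PySem.List.pyGet? all random_number).getD ("", "")  -- none = IndexError, excluded by Pre_
  | t :: r, first_priority =>
    if PySem.Dict.get? (PySem.Dict.mk graph_s) t.2 == some 0 then t
    else
      altLoop graph_s random_number all priority_tran r
        (match first_priority with
         | none => if priority_tran.contains t.1 then some t else none
         | some p => some p)

def ChooseNextState_alt (graph_s : List (String × Int)) (random_number : Int) (transactions : List (String × String)) (priority_tran : List String) : String × String :=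
  altLoop graph_s random_number transactions priority_tran transactions none

-- ===== PRECONDITION & SPEC =====
-- Pre_ excludes exactly the inputs on which Python A raises: a KeyError (some transaction's
-- target state is missing from graph_s with no zero-score hit strictly earlier in the scan),
-- and an IndexError (both loops fall through and random_number is out of range).
def Pre_ChooseNextState (graph_s : List (String × Int)) (random_number : Int) (transactions : List (String × String)) (priority_tran : List String) : Prop :=
  (∀ i : Fin transactions.length, PySem.Dict.get? (PySem.Dict.mk graph_s) (transactions.get i).2 = none →
      ∃ j : Fin transactions.length, j < i ∧ PySem.Dict.get? (PySem.Dict.mk graph_s) (transactions.get j).2 = some 0) ∧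
  ((¬ ∃ t ∈ transactions, PySem.Dict.get? (PySem.Dict.mk graph_s) t.2 = some 0) →
   (¬ ∃ t ∈ transactions, t.1 ∈ priority_tran) →
   PySem.Raise.InRange transactions.length random_number)

instance (graph_s : List (String × Int)) (random_number : Int) (transactions : List (String × String)) (priority_tran : List String) : Decidable (Pre_ChooseNextState graph_s random_number transactions priority_tran) := by unfold Pre_ChooseNextState; infer_instance

def pvWitness_ChooseNextState : (List (String × Int)) × Int × (List (String × String)) × List String :=
  ([("a", 0), ("b", 1)], 0, [("go", "b"), ("stop", "a")], ["stop"])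

def Spec_ChooseNextState (graph_s : List (String × Int)) (random_number : Int) (transactions : List (String × String)) (priority_tran : List String) (out : String × String) : Prop := out = ChooseNextState_alt graph_s random_number transactions priority_tran
instance (graph_s : List (String × Int)) (random_number : Int) (transactions : List (String × String)) (priority_tran : List String) (out : String × String) : Decidable (Spec_ChooseNextState graph_s random_number transactions priority_tran out) := by unfold Spec_ChooseNextState; infer_instance

-- ===== CLAIM (what is proved, stated in full; the proofs are below) =====
def Claim_equal_ChooseNextState : Prop := ∀ (graph_s : List (String × Int)) (random_number : Int) (transactions : List (String × String)) (priority_tran : List String), Dom_ChooseNextState graph_s random_number transactions priority_tran → Pre_ChooseNextState graph_s random_number transactions priority_tran → Spec_ChooseNextState graph_s random_number transactions priority_tran (ChooseNextState graph_s random_number transactions priority_tran)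

-- ===== LEMMAS AND PROOFS =====

-- the merged loop equals A's two scans, for any remembered first_priority
theorem altLoop_eq (graph_s : List (String × Int)) (random_number : Int) (all : List (String × String)) (priority_tran : List String) (L : List (String × String)) (fp : Option (String × String)) :
    altLoop graph_s random_number all priority_tran L fp =
      match aZeroLoop graph_s L with
      | some t => t
      | none =>
        match fp with
        | some p => p
        | none =>
          match aPrioLoop priority_tran L with
          | some t => t
          | none => (PySem.List.pyGet? all random_number).getD ("", "") := by
  induction L generalizing fp with
  | nil => cases fp <;> rfl
  | cons t r ih =>
    simp only [altLoop, aZeroLoop, aPrioLoop]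
    by_cases hz : PySem.Dict.get? (PySem.Dict.mk graph_s) t.2 == some 0
    · simp [hz]
    · simp only [hz, Bool.false_eq_true, not_false_eq_true, if_neg]
      rw [ih]
      cases fp with
      | some p => simp
      | none =>
        by_cases hp : t.1 ∈ priority_tran
        · simp [hp]
        · simp [hp]

-- ===== VERDICT (by name: the statement is the Claim_ definition above) =====
theorem ChooseNextState_spec : Claim_equal_ChooseNextState := by
  intro graph_s random_number transactions priority_tran _ _
  unfold Spec_ChooseNextState ChooseNextState ChooseNextState_alt
  rw [altLoop_eq]
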